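-- pv_equiv track=rewrite | github.com/allinne/advent2024 | 03b.py | enabled_parts
-- ===== SOURCE A (Python) =====
-- def enabled_parts(l):
--     '''
--     >>> enabled_parts("xmul(2,4)&mul[3,7]!^don't()_mul(5,5)+mul(32,64](mul(11,8)undo()?mul(8,5))")
--     ['xmul(2,4)&mul[3,7]!^', '?mul(8,5))']
--
--     >>> enabled_parts("12mul(9,2)do()Www")
--     ['12mul(9,2)do()Www']
--
--     >>> enabled_parts("12mul(9,2)don't()Www")
--     ['12mul(9,2)']
--
--     >>> enabled_parts("kkkdon't()Wwwdo()sdmul(2,3)sf")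
--     ['kkk', 'sdmul(2,3)sf']
--     '''
--     do = True
--     pos = 0
--     parts = []
--     while pos < len(l):
--         if do:
--             new_pos = l.find("don't()", pos)
--             if new_pos > -1:
--                 parts.append(l[pos:new_pos])
--                 pos = new_pos + len("don't()")
--                 do = False
--             else: # dont is not found till end
--                 parts.append(l[pos:])
--                 pos = len(l)
--         else:
--             new_pos = l.find("do()", pos)
--             if new_pos > -1:
--                 do = True
--                 pos = new_pos + len("do()")
--             else: # dont till the end
--                 pos = len(l)
--     return parts
-- ===== SOURCE B (Python) =====
-- def enabled_parts(l):
--     if not l: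
--         return []
--     i = l.find("don't()")
--     if i == -1:
--         return [l]
--     return [l[:i]] + _disabled(l[i + 7:])
--
--
-- def _disabled(s):
--     j = s.find("do()")
--     if j == -1:
--         return []
--     return enabled_parts(s[j + 4:])
-- ===== Notes on version B (the rewrite author's own statement) =====
-- stated objective: simpler
-- what changed: A's stateful while loop (do/don't flag, absolute position, accumulator list, find-from-position) is replaced by a direct mutual recursion on the remaining suffix: the enabled step cuts at the first don't() and conses the prefix, the disabled step skips to just past the first do().
import Mathlib
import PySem

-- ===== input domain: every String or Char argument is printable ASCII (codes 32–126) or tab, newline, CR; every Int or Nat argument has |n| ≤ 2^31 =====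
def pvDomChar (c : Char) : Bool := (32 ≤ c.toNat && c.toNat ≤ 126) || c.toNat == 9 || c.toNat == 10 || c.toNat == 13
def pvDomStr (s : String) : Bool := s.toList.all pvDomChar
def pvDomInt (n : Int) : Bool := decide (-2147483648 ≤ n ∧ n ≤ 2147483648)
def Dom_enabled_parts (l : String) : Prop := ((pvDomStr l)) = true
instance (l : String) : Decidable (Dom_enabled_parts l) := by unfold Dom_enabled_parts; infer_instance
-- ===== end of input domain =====

-- B replaces A's while loop (a do/don't flag, an absolute position and an accumulator list)
-- by a direct mutual recursion on the remaining suffix; objective: simpler, same cost.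

-- ===== PORT A =====
-- A's while loop: fuel = one unit per iteration (pos strictly increases each pass, so
-- l.length + 1 units suffice); state (do, pos, parts) exactly as in the Python.
def enabledPartsLoopA (l : List Char) : Nat → Bool → Int → List (List Char) → List (List Char)
  | 0, _, _, parts => parts
  | fuel + 1, doFlag, pos, parts =>
    if pos < (l.length : Int) then
      if doFlag then
        let newPos := PySem.Chars.findFrom l "don't()".toList pos none
        if newPos > -1 then
          enabledPartsLoopA l fuel false (newPos + 7)
            (parts ++ [PySem.Chars.slice l (some pos) (some newPos)])
        else
          enabledPartsLoopA l fuel doFlag (l.length : Int)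
            (parts ++ [PySem.Chars.slice l (some pos) none])
      else
        let newPos := PySem.Chars.findFrom l "do()".toList pos none
        if newPos > -1 then
          enabledPartsLoopA l fuel true (newPos + 4) parts
        else
          enabledPartsLoopA l fuel doFlag (l.length : Int) parts
    else parts

def enabled_parts (l : String) : List String :=
  (enabledPartsLoopA l.toList (l.toList.length + 1) true 0 []).map String.ofList

-- ===== PORT B =====
-- Source B's mutual recursion (enabled_parts ↔ _disabled), on List Char.
mutual
  def enabledPartsB (s : List Char) : List (List Char) :=
    if hs : s = [] then []
    else
      let i := PySem.Chars.find s "don't()".toList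
      if i = -1 then [s]
      else (s.take i.toNat) :: disabledPartsB (s.drop (i.toNat + 7))
  termination_by 2 * s.length
  decreasing_by
    have := List.length_pos_iff.mpr hs
    simp [List.length_drop]; omega

  def disabledPartsB (s : List Char) : List (List Char) :=
    let j := PySem.Chars.find s "do()".toList
    if j = -1 then []
    else enabledPartsB (s.drop (j.toNat + 4))
  termination_by 2 * s.length + 1
  decreasing_by
    simp [List.length_drop]
end

def enabled_parts_alt (l : String) : List String :=
  (enabledPartsB l.toList).map String.ofList

-- ===== PRECONDITION & SPEC =====
def Spec_enabled_parts (l : String) (out : List String) : Prop := out = enabled_parts_alt l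
instance (l : String) (out : List String) : Decidable (Spec_enabled_parts l out) := by unfold Spec_enabled_parts; infer_instance

-- ===== CLAIM (what is proved, stated in full; the proofs are below) =====
def Claim_equal_enabled_parts : Prop := ∀ (l : String), Dom_enabled_parts l → Spec_enabled_parts l (enabled_parts l)

-- ===== LEMMAS AND PROOFS =====

theorem enabled_parts_main (l : List Char) (fuel : Nat) (p : Nat) (parts : List (List Char))
    (hp : p ≤ l.length) (hf : l.length - p < fuel) (doFlag : Bool) :
    enabledPartsLoopA l fuel doFlag (p : Int) parts =
      parts ++ (if doFlag then enabledPartsB (l.drop p) else disabledPartsB (l.drop p)) := by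
  induction fuel generalizing p parts doFlag with
  | zero => omega
  | succ fuel ih =>
    by_cases hlt : p < l.length
    · -- one loop iteration
      rw [enabledPartsLoopA]
      rw [if_pos (by exact_mod_cast hlt)]
      cases doFlag with
      | true =>
        rw [if_pos rfl, PySem.Chars.findFrom_natCast l _ p hp]
        by_cases hi : PySem.Chars.find (l.drop p) "don't()".toList = -1
        · rw [if_pos hi]
          rw [if_neg (by omega)]
          rw [PySem.Chars.slice_eq_listSlice, PySem.List.slice_from_natCast]
          rw [show ((l.length : Int)) = ((l.length : Nat) : Int) from rfl]
          rw [ih l.length _ (le_refl _) (by omega) true]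
          rw [List.drop_length]
          have hne : l.drop p ≠ [] := by
            intro h
            have := congrArg List.length h
            simp [List.length_drop] at this
            omega
          conv_rhs => rw [enabledPartsB]
          rw [dif_neg hne, if_pos hi]
          simp [enabledPartsB]
        · rw [if_neg hi]
          set i := PySem.Chars.find (l.drop p) "don't()".toList with hidef
          have h0 : 0 ≤ i := by
            have := PySem.Chars.neg_one_le_find (l.drop p) "don't()".toList
            omega
          have hpre := (PySem.Chars.find_spec (s := l.drop p) (sub := "don't()".toList) h0).1
          rw [← hidef] at hpre
          have hlen := hpre.length_le
          rw [List.length_drop, List.length_drop] at hlen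
          have h7 : "don't()".toList.length = 7 := rfl
          rw [h7] at hlen
          have hbound : i.toNat + 7 ≤ l.length - p := by omega
          rw [if_pos (by omega)]
          rw [show (↑p + i : Int) = ((p : Int) + ((i.toNat : Nat) : Int)) by omega]
          rw [PySem.Chars.slice_eq_listSlice, PySem.List.slice_natCast_add]
          rw [show ((p : Int) + ((i.toNat : Nat) : Int) + 7) = (((p + i.toNat + 7 : Nat) : Nat) : Int) by push_cast; ring]
          rw [ih (p + i.toNat + 7) _ (by omega) (by omega) false]
          conv_rhs => rw [enabledPartsB]
          have hne : l.drop p ≠ [] := by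
            intro h
            have := congrArg List.length h
            simp [List.length_drop] at this
            omega
          rw [dif_neg hne, if_neg hi]
          rw [if_neg (by decide), List.drop_drop, ← hidef,
              show p + (i.toNat + 7) = p + i.toNat + 7 from by omega]
          simp
      | false =>
        rw [if_neg (by decide), PySem.Chars.findFrom_natCast l _ p hp]
        by_cases hj : PySem.Chars.find (l.drop p) "do()".toList = -1
        · rw [if_pos hj]
          rw [if_neg (by omega)]
          rw [show ((l.length : Int)) = ((l.length : Nat) : Int) from rfl]
          rw [ih l.length _ (le_refl _) (by omega) false]
          rw [List.drop_length]
          conv_rhs => rw [disabledPartsB]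
          rw [if_pos hj]
          simp [disabledPartsB]
          intro hx
          exact absurd (by decide) hx
        · rw [if_neg hj]
          set j := PySem.Chars.find (l.drop p) "do()".toList with hjdef
          have h0 : 0 ≤ j := by
            have := PySem.Chars.neg_one_le_find (l.drop p) "do()".toList
            omega
          have hpre := (PySem.Chars.find_spec (s := l.drop p) (sub := "do()".toList) h0).1
          rw [← hjdef] at hpre
          have hlen := hpre.length_le
          rw [List.length_drop, List.length_drop] at hlen
          have h4 : "do()".toList.length = 4 := rfl
          rw [h4] at hlen
          have hbound : j.toNat + 4 ≤ l.length - p := by omega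
          rw [if_pos (by omega)]
          rw [show (↑p + j + 4 : Int) = (((p + j.toNat + 4 : Nat)) : Int) by omega]
          rw [ih (p + j.toNat + 4) _ (by omega) (by omega) true]
          conv_rhs => rw [disabledPartsB]
          rw [if_neg hj]
          rw [if_pos rfl, List.drop_drop, ← hjdef,
              show p + (j.toNat + 4) = p + j.toNat + 4 from by omega]
          rw [if_neg (by decide)]
    · -- pos = len: loop exits
      have hpe : p = l.length := by omega
      subst hpe
      rw [enabledPartsLoopA, if_neg (by omega)]
      simp [List.drop_length, enabledPartsB, disabledPartsB]

-- ===== VERDICT (by name: the statement is the Claim_ definition above) =====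
theorem enabled_parts_spec : Claim_equal_enabled_parts := by
  intro l _
  unfold Spec_enabled_parts enabled_parts enabled_parts_alt
  have h := enabled_parts_main l.toList (l.toList.length + 1) 0 [] (by omega) (by omega) true
  simp at h
  simpa using congrArg (List.map String.ofList) h
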